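-- pv_equiv track=rewrite | github.com/maxrainer/iosawxplays | roles/iospush/library/config_compliance.py | extract_additional_lines
-- ===== SOURCE A (Python) =====
-- def extract_additional_lines(config_lines, start_index, search_until):
--     extra_lines = []
--     extra_indices = []
--
--     for i, line in enumerate(config_lines[start_index:]):
--         line = line.strip()
--
--         if line.endswith(search_until):
--             extra_lines.append(line)
--             extra_indices.append(i + start_index)
--             break
--
--         else:
--             extra_lines.append(line)
--             extra_indices.append(i + start_index)
--
--     return extra_indices, extra_lines
-- ===== SOURCE B (Python) =====
-- def extract_additional_lines(config_lines, start_index, search_until):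
--     tail = [l.strip() for l in config_lines[start_index:]]
--     cut = len(tail)
--     for i, l in enumerate(tail):
--         if l.endswith(search_until):
--             cut = i + 1
--             break
--     return list(range(start_index, start_index + cut)), tail[:cut]
-- ===== Notes on version B (the rewrite author's own statement) =====
-- stated objective: alternative
-- what changed: B first computes the cutoff index (first stripped line ending with the suffix, or the slice length), then materialises the indices as a range and the lines as a slice of the pre-stripped tail, instead of A's single loop with dual appends and an embedded break.
import Mathlib
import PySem

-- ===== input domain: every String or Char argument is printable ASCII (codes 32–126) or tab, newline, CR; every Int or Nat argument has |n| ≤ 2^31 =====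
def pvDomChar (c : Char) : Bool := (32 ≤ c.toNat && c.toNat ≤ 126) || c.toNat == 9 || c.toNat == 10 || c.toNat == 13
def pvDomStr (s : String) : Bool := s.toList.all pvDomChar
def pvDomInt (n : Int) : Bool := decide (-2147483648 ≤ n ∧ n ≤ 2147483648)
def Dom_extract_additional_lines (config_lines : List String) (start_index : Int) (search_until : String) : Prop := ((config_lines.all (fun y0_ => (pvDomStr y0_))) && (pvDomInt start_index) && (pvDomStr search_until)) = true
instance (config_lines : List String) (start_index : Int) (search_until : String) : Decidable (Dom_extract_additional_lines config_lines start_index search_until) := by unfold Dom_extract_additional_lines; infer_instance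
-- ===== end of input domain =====

-- B computes the cutoff index first, then builds the indices as a range and the lines as a slice; same O(n) cost, different decomposition.
-- ===== PORT A =====
def extractGoA (si : Int) (su : String) : Int -> List String -> List Int × List String
  | _, [] => ([], [])
  | i, l :: ls =>
    let line := PySem.Str.strip l
    if PySem.Str.endswith line su then
      ([i + si], [line])
    else
      let r := extractGoA si su (i + 1) ls
      ((i + si) :: r.1, line :: r.2)

def extract_additional_lines (config_lines : List String) (start_index : Int) (search_until : String) : List Int × List String :=
  extractGoA start_index search_until 0 (PySem.List.slice config_lines (some start_index) none)

-- ===== PORT B =====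
def extract_additional_lines_alt (config_lines : List String) (start_index : Int) (search_until : String) : List Int × List String :=
  let tail := (PySem.List.slice config_lines (some start_index) none).map PySem.Str.strip
  let cut : Nat :=
    match tail.findIdx? (fun l => PySem.Str.endswith l search_until) with
    | some i => i + 1
    | none => tail.length
  (PySem.List.pyRange start_index (start_index + cut) 1, tail.take cut)

-- ===== PRECONDITION & SPEC =====
def Spec_extract_additional_lines (config_lines : List String) (start_index : Int) (search_until : String) (out : List Int × List String) : Prop := out = extract_additional_lines_alt config_lines start_index search_until
instance (config_lines : List String) (start_index : Int) (search_until : String) (out : List Int × List String) : Decidable (Spec_extract_additional_lines config_lines start_index search_until out) := by unfold Spec_extract_additional_lines; infer_instance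

-- ===== CLAIM (what is proved, stated in full; the proofs are below) =====
def Claim_equal_extract_additional_lines : Prop := ∀ (config_lines : List String) (start_index : Int) (search_until : String), Dom_extract_additional_lines config_lines start_index search_until → Spec_extract_additional_lines config_lines start_index search_until (extract_additional_lines config_lines start_index search_until)

-- ===== LEMMAS AND PROOFS =====

/-- The cutoff B computes, as a function of the (unstripped) tail. -/
def cutF (su : String) (ts : List String) : Nat :=
  match ts.findIdx? (fun l => PySem.Str.endswith (PySem.Str.strip l) su) with
  | some i => i + 1
  | none => ts.length

theorem cutF_nil (su : String) : cutF su [] = 0 := rfl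

theorem cutF_cons_pos (su : String) (l : String) (ls : List String)
    (h : PySem.Str.endswith (PySem.Str.strip l) su = true) :
    cutF su (l :: ls) = 1 := by
  simp only [PySem.Str.endswith, PySem.Str.strip, String.toList_ofList] at h
  simp [cutF, List.findIdx?_cons, PySem.Str.endswith, PySem.Str.strip, h]

theorem cutF_cons_neg (su : String) (l : String) (ls : List String)
    (h : PySem.Str.endswith (PySem.Str.strip l) su = false) :
    cutF su (l :: ls) = cutF su ls + 1 := by
  simp only [PySem.Str.endswith, PySem.Str.strip, String.toList_ofList] at h
  simp only [cutF, List.findIdx?_cons, PySem.Str.endswith, PySem.Str.strip]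
  cases hf : List.findIdx? (fun l => PySem.Chars.endswith (PySem.Chars.strip l.toList) su.toList) ls <;>
    simp [hf, h]

theorem extractGoA_eq (si : Int) (su : String) (ts : List String) : ∀ (j : Int),
    extractGoA si su j ts =
      (PySem.List.pyRange (j + si) (j + si + cutF su ts) 1,
        (ts.map PySem.Str.strip).take (cutF su ts)) := by
  induction ts with
  | nil => intro j; simp [extractGoA, cutF_nil, PySem.List.pyRange_one_eq_nil]
  | cons l ls ih =>
    intro j
    by_cases h : PySem.Str.endswith (PySem.Str.strip l) su = true
    · rw [cutF_cons_pos su l ls h]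
      simp only [PySem.Str.endswith, PySem.Str.strip, String.toList_ofList] at h
      simp [extractGoA, PySem.Str.endswith, PySem.Str.strip, h,
        PySem.List.pyRange_one_singleton]
    · rw [Bool.not_eq_true] at h
      rw [cutF_cons_neg su l ls h]
      have h0 : (0 : Int) ≤ (cutF su ls : Int) := Int.natCast_nonneg _
      have hlt : j + si < j + si + ((cutF su ls : Int) + 1) := by omega
      have e1 : j + si + 1 = j + 1 + si := by ring
      have e2 : j + si + ((cutF su ls : Int) + 1) = j + 1 + si + (cutF su ls : Int) := by ring
      simp only [PySem.Str.endswith, PySem.Str.strip, String.toList_ofList] at h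
      simp only [extractGoA, PySem.Str.endswith, PySem.Str.strip, String.toList_ofList]
      rw [if_neg (by simp [h]), ih (j + 1)]
      push_cast
      rw [PySem.List.pyRange_one_cons hlt, e1, e2]
      simp [PySem.Str.strip]

theorem extract_additional_lines_spec : Claim_equal_extract_additional_lines := by
  intro config_lines start_index search_until _
  unfold Spec_extract_additional_lines extract_additional_lines extract_additional_lines_alt
  rw [extractGoA_eq]
  have hfind : ((PySem.List.slice config_lines (some start_index) none).map PySem.Str.strip).findIdx?
      (fun l => PySem.Str.endswith l search_until)
      = (PySem.List.slice config_lines (some start_index) none).findIdx?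
        (fun l => PySem.Str.endswith (PySem.Str.strip l) search_until) := by
    rw [List.findIdx?_map]; rfl
  simp only [hfind]
  simp [cutF, zero_add]
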